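-- pv_equiv track=rewrite | github.com/TDK1969/My-Leetcode | match/2024.3.31 tx/4.py | solution
-- ===== SOURCE A (Python) =====
-- from typing import List
--
-- def solution(n: int, k: int, nums: List[int]) -> int:
--     xor = [[0 for _ in range(n + 1)] for _ in range(n + 1)]
--     # xor[n][m] = nums[n:m]的异或
--     for i in range(0, n):
--         for j in range(i + 1, n + 1):
--             if j == i + 1:
--                 xor[i][j] = nums[i]
--             else:
--                 xor[i][j] = xor[i][j - 1] ^ nums[j - 1]
--
--     # dp[i][j]表示nums[:i]分为j + 1段的分段异或最大和
--     dp = [[0 for _ in range(k)] for _ in range(n + 1)]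
--     # 边界条件：nums[:i]分为1段
--     for i in range(1, n + 1):
--         dp[i][0] = xor[0][i]
--
--     for j in range(1, k):
--         for i in range(j + 1, n + 1):
--             for p in range(1, i):
--                 dp[i][j] = max(dp[i][j], dp[i - p][j - 1] + xor[i - p][i])
--
--     return dp[-1][-1]
-- ===== SOURCE B (Python) =====
-- from typing import List
--
-- def solution(n: int, k: int, nums: List[int]) -> int:
--     # Top-down memoized recursion instead of bottom-up table filling: best(i, j) is the
--     # best score for splitting the prefix nums[:i] into j + 1 parts; the xor of each
--     # candidate last segment is accumulated on the fly while scanning the cut point,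
--     # so neither the O(n^2) xor table nor the dp matrix is materialised.
--     memo = {}
--
--     def best(i: int, j: int) -> int:
--         if j == 0:
--             acc = 0
--             for x in range(i):
--                 acc ^= nums[x]
--             return acc
--         if i < j + 1:
--             return 0
--         if (i, j) in memo:
--             return memo[(i, j)]
--         res = 0
--         acc = 0
--         for p in range(1, i):
--             acc ^= nums[i - p]
--             res = max(res, best(i - p, j - 1) + acc)
--         memo[(i, j)] = res
--         return res
--
--     return best(n, k - 1)
-- ===== Notes on version B (the rewrite author's own statement) =====
-- stated objective: alternative
-- what changed: Replaces A's bottom-up filling of an O(n^2) xor table plus an (n+1)-by-k dp matrix with a top-down memoized recursion best(i, j) over (prefix length, remaining cuts); each candidate segment's xor is accumulated on the fly while scanning the cut point, so no xor table or dp matrix exists and only reachable states are computed.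
import Mathlib
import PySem

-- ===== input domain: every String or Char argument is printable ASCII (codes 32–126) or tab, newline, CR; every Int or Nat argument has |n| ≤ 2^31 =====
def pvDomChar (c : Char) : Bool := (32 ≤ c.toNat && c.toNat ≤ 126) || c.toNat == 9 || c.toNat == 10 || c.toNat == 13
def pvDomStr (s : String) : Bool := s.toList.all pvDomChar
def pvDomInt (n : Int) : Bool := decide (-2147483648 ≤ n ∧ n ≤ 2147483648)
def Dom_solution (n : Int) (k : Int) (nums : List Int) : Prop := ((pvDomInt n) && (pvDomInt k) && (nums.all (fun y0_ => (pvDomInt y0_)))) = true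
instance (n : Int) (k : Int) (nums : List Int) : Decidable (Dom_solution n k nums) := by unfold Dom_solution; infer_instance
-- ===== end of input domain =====

-- B replaces A's bottom-up filling of an O(n^2) xor table and an (n+1)-by-k dp matrix with a
-- top-down memoized recursion over (prefix length, remaining cuts), accumulating each candidate
-- segment's xor on the fly (objective: alternative decomposition, no tables).

-- ===== PORT A =====
-- A's tables are ported as memo recurrences that hold exactly the cell values A's fill
-- loops store: pvXorTabA nums i j = xor[i][j] (fill order j = i+1 .. n of A's inner loop),
-- pvDpA nums j i = dp[i][j] (A stores 0 in every cell its loops skip, hence the guards,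
-- and the p-loop is the foldl accumulating max starting from the cell's initial 0).
def pvXorTabA (nums : List Int) (i : Nat) : Nat → Int
  | 0 => 0
  | j + 1 => if j = i then nums.getD i 0
             else PySem.Int.bxor (pvXorTabA nums i j) (nums.getD j 0)

def pvDpA (nums : List Int) : Nat → Nat → Int
  | 0, i => if 1 ≤ i then pvXorTabA nums 0 i else 0
  | j + 1, i =>
      if j + 2 ≤ i then
        (List.range' 1 (i - 1)).foldl
          (fun acc p => max acc (pvDpA nums j (i - p) + pvXorTabA nums (i - p) i)) 0
      else 0

def solution (n : Int) (k : Int) (nums : List Int) : Int :=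
  -- return dp[-1][-1] = dp[n][k-1]
  pvDpA nums (k.toNat - 1) n.toNat

-- ===== PORT B =====
-- Source B's 'best(i, j)' recursion, step for step; the memo dict is a pure cache (it only ever
-- stores the value the recursion computes), so the port is the same recursion without the cache.
-- The p-loop carries the pair (res, acc) exactly as B does.
def pvBestB (nums : List Int) : Nat → Nat → Int
  | i, 0 => (List.range i).foldl (fun a x => PySem.Int.bxor a (nums.getD x 0)) 0
  | i, j + 1 =>
      if i < j + 2 then 0
      else
        ((List.range' 1 (i - 1)).foldl
          (fun (s : Int × Int) p =>
            let acc := PySem.Int.bxor s.2 (nums.getD (i - p) 0)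
            (max s.1 (pvBestB nums (i - p) j + acc), acc))
          (0, 0)).1

def solution_alt (n : Int) (k : Int) (nums : List Int) : Int :=
  pvBestB nums n.toNat (k.toNat - 1)

-- ===== PRECONDITION & SPEC =====
-- Pre_ excludes exactly the inputs where A raises IndexError: n < 0 or k < 1 (dp[-1][-1]
-- hits an empty list) and n > len(nums) (nums[i] out of range).
def Pre_solution (n : Int) (k : Int) (nums : List Int) : Prop :=
  0 ≤ n ∧ n ≤ nums.length ∧ 1 ≤ k
instance (n : Int) (k : Int) (nums : List Int) : Decidable (Pre_solution n k nums) := by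
  unfold Pre_solution; infer_instance

def pvWitness_solution : Int × Int × List Int := (3, 2, [1, 2, 3])

def Spec_solution (n : Int) (k : Int) (nums : List Int) (out : Int) : Prop := out = solution_alt n k nums
instance (n : Int) (k : Int) (nums : List Int) (out : Int) : Decidable (Spec_solution n k nums out) := by unfold Spec_solution; infer_instance

-- ===== CLAIM (what is proved, stated in full; the proofs are below) =====
def Claim_equal_solution : Prop := ∀ (n : Int) (k : Int) (nums : List Int), Dom_solution n k nums → Pre_solution n k nums → Spec_solution n k nums (solution n k nums)

-- ===== LEMMAS AND PROOFS =====

-- two's-complement view of an Int: pvEnc false m = m, pvEnc true m = -m-1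
def pvEnc (s : Bool) (m : Nat) : Int := if s then -(m : Int) - 1 else (m : Int)

lemma pvBxor_enc (s t : Bool) (m j : Nat) :
    PySem.Int.bxor (pvEnc s m) (pvEnc t j) = pvEnc (s != t) (m ^^^ j) := by
  have hm : (0:Int) ≤ (m:Int) := Int.natCast_nonneg m
  have hj : (0:Int) ≤ (j:Int) := Int.natCast_nonneg j
  have em : (-(-(m:Int) - 1) - 1) = (m:Int) := by ring
  have ej : (-(-(j:Int) - 1) - 1) = (j:Int) := by ring
  cases s <;> cases t
  · exact PySem.Int.bxor_natCast m j
  · show PySem.Int.bxor (m:Int) (-(j:Int) - 1) = -((m ^^^ j : Nat) : Int) - 1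
    unfold PySem.Int.bxor
    rw [if_pos hm, if_neg (by omega), ej]
    simp
  · show PySem.Int.bxor (-(m:Int) - 1) (j:Int) = -((m ^^^ j : Nat) : Int) - 1
    unfold PySem.Int.bxor
    rw [if_neg (by omega), if_pos hj, em]
    simp
  · show PySem.Int.bxor (-(m:Int) - 1) (-(j:Int) - 1) = ((m ^^^ j : Nat) : Int)
    unfold PySem.Int.bxor
    rw [if_neg (by omega), if_neg (by omega), em, ej]
    simp

lemma pvEnc_surj (a : Int) : ∃ s m, a = pvEnc s m := by
  rcases a with m | m
  · exact ⟨false, m, rfl⟩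
  · exact ⟨true, m, by simp [pvEnc, Int.negSucc_eq]; ring⟩

lemma pvBxor_assoc (a b c : Int) :
    PySem.Int.bxor (PySem.Int.bxor a b) c = PySem.Int.bxor a (PySem.Int.bxor b c) := by
  obtain ⟨sa, ma, rfl⟩ := pvEnc_surj a
  obtain ⟨sb, mb, rfl⟩ := pvEnc_surj b
  obtain ⟨sc, mc, rfl⟩ := pvEnc_surj c
  rw [pvBxor_enc, pvBxor_enc, pvBxor_enc, pvBxor_enc]
  rw [Nat.xor_assoc]
  cases sa <;> cases sb <;> cases sc <;> rfl

-- prefix xor of nums[:m]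
def pvPfx (nums : List Int) : Nat → Int
  | 0 => 0
  | m + 1 => PySem.Int.bxor (pvPfx nums m) (nums.getD m 0)

lemma pvXorTabA_eq_pfx (nums : List Int) (i j : Nat) (hij : i < j) :
    pvXorTabA nums i j = PySem.Int.bxor (pvPfx nums j) (pvPfx nums i) := by
  induction j with
  | zero => omega
  | succ j ih =>
    by_cases h : j = i
    · subst h
      rw [pvXorTabA, if_pos rfl]
      show nums.getD j 0 =
        PySem.Int.bxor (PySem.Int.bxor (pvPfx nums j) (nums.getD j 0)) (pvPfx nums j)
      rw [PySem.Int.bxor_comm _ (pvPfx nums j), ← pvBxor_assoc, PySem.Int.bxor_self,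
        PySem.Int.bxor_comm, PySem.Int.bxor_zero]
    · have hij' : i < j := by omega
      rw [pvXorTabA, if_neg h, ih hij']
      show PySem.Int.bxor (PySem.Int.bxor (pvPfx nums j) (pvPfx nums i)) (nums.getD j 0) =
        PySem.Int.bxor (PySem.Int.bxor (pvPfx nums j) (nums.getD j 0)) (pvPfx nums i)
      rw [pvBxor_assoc, pvBxor_assoc, PySem.Int.bxor_comm (pvPfx nums i)]

-- B's base case: the index loop over range(i) is the prefix xor
lemma pvRangeFold_eq_pfx (nums : List Int) (i : Nat) :
    (List.range i).foldl (fun a x => PySem.Int.bxor a (nums.getD x 0)) 0 = pvPfx nums i := by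
  induction i with
  | zero => simp [pvPfx]
  | succ i ih =>
    rw [List.range_succ, List.foldl_append, ih]
    rfl

-- B's running segment xor: after p steps it equals pfx i ^ pfx (i - p)
def pvAcc (nums : List Int) (i : Nat) : Nat → Int
  | 0 => 0
  | p + 1 => PySem.Int.bxor (pvAcc nums i p) (nums.getD (i - (p + 1)) 0)

lemma pvAcc_eq (nums : List Int) (i p : Nat) (hp : p ≤ i) :
    pvAcc nums i p = PySem.Int.bxor (pvPfx nums i) (pvPfx nums (i - p)) := by
  induction p with
  | zero => simp [pvAcc, PySem.Int.bxor_self]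
  | succ p ih =>
    rw [pvAcc, ih (by omega)]
    have hstep : pvPfx nums (i - p) =
        PySem.Int.bxor (pvPfx nums (i - (p + 1))) (nums.getD (i - (p + 1)) 0) := by
      have : i - p = (i - (p + 1)) + 1 := by omega
      rw [this, pvPfx]
    rw [hstep, pvBxor_assoc, pvBxor_assoc, PySem.Int.bxor_self, PySem.Int.bxor_zero]

-- B's p-loop, characterised: it carries (A-style max fold, running segment xor)
lemma pvFoldPair (nums : List Int) (i j : Nat)
    (H : ∀ i', i' ≤ nums.length → pvBestB nums i' j = pvDpA nums j i')
    (hi : i ≤ nums.length) (m : Nat) (hm : m < i) :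
    (List.range' 1 m).foldl
      (fun (s : Int × Int) p =>
        let acc := PySem.Int.bxor s.2 (nums.getD (i - p) 0)
        (max s.1 (pvBestB nums (i - p) j + acc), acc))
      (0, 0) =
    ((List.range' 1 m).foldl
      (fun acc p => max acc (pvDpA nums j (i - p) + pvXorTabA nums (i - p) i)) 0,
     pvAcc nums i m) := by
  induction m with
  | zero => simp [pvAcc]
  | succ m ih =>
    rw [List.range'_concat, List.foldl_append, List.foldl_append, ih (by omega)]
    simp only [List.foldl_cons, List.foldl_nil]
    have h1m : 1 + 1 * m = m + 1 := by ring
    rw [h1m]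
    have hacc : PySem.Int.bxor (pvAcc nums i m) (nums.getD (i - (m + 1)) 0) =
        pvAcc nums i (m + 1) := rfl
    simp only [hacc]
    refine Prod.ext ?_ rfl
    show max _ (pvBestB nums (i - (m + 1)) j + pvAcc nums i (m + 1)) = _
    rw [H (i - (m + 1)) (by omega), pvAcc_eq nums i (m + 1) (by omega),
        pvXorTabA_eq_pfx nums (i - (m + 1)) i (by omega)]

-- B's recursion computes exactly A's dp cells
lemma pvBestB_eq_dpA (nums : List Int) (j : Nat) :
    ∀ i, i ≤ nums.length → pvBestB nums i j = pvDpA nums j i := by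
  induction j with
  | zero =>
    intro i hi
    rw [pvBestB, pvDpA, pvRangeFold_eq_pfx nums i]
    by_cases h : 1 ≤ i
    · rw [if_pos h, pvXorTabA_eq_pfx nums 0 i (by omega)]
      show _ = PySem.Int.bxor (pvPfx nums i) (0 : Int)
      rw [PySem.Int.bxor_zero]
    · have : i = 0 := by omega
      subst this
      simp [pvPfx]
  | succ j ih =>
    intro i hi
    rw [pvBestB, pvDpA]
    by_cases h : i < j + 2
    · rw [if_pos h, if_neg (by omega)]
    · rw [if_neg h, if_pos (by omega)]
      rw [pvFoldPair nums i j ih hi (i - 1) (by omega)]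

-- ===== VERDICT (by name: the statement is the Claim_ definition above) =====
theorem solution_spec : Claim_equal_solution := by
  intro n k nums _ ⟨hn0, hnl, hk⟩
  show solution n k nums = solution_alt n k nums
  unfold solution solution_alt
  exact (pvBestB_eq_dpA nums (k.toNat - 1) n.toNat (by omega)).symm
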